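-- pv_equiv track=rewrite | github.com/hwansnaa/Algorithm | Programmers_2020 KAKAO BLIND RECRUITMENT_문자열 압축.py | cutting
-- ===== SOURCE A (Python) =====
-- def cutting(s, length):
--     start_target = s[0:length]
--     press = 1
--     answer = ''
--     for i in range(length, len(s), length):
--         if len(s) < i+length:
--             if press == 1:
--                 answer+= start_target + s[i:]
--             else:
--                 answer += str(press) + start_target + s[i:]
--             return len(answer)
--         if start_target == s[i:i+length]:
--             press += 1
--         else:
--             if press == 1:
--                 answer += start_target
--             else:
--                 answer += str(press) + start_target
--             start_target = s[i:i+length]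
--             press = 1
--     if press == 1:
--         answer += start_target
--     else:
--         answer += str(press) + start_target
--     return len(answer)
-- ===== SOURCE B (Python) =====
-- def cutting(s, length):
--     chunks = [s[i:i+length] for i in range(0, len(s), length)]
--
--     def go(rest):
--         if not rest:
--             return 0
--         head = rest[0]
--         k = 1
--         while k < len(rest) and rest[k] == head:
--             k += 1
--         return len(head) + (len(str(k)) if k > 1 else 0) + go(rest[k:])
--
--     return go(chunks)
-- ===== Notes on version B (the rewrite author's own statement) =====
-- stated objective: alternative
-- what changed: B first splits s into the chunk list, then consumes it by recursive run-splitting (count the leading run, emit its contribution, recurse on the remainder), instead of A's single index loop over the string with carried start_target/press state, duplicated flush code and an early return for the partial tail chunk.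
-- outside the precondition, e.g. on cutting('abc', -1): A returns 2, B returns 0; on cutting('abc', 0): A raises ValueError, B raises ValueError
import Mathlib
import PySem

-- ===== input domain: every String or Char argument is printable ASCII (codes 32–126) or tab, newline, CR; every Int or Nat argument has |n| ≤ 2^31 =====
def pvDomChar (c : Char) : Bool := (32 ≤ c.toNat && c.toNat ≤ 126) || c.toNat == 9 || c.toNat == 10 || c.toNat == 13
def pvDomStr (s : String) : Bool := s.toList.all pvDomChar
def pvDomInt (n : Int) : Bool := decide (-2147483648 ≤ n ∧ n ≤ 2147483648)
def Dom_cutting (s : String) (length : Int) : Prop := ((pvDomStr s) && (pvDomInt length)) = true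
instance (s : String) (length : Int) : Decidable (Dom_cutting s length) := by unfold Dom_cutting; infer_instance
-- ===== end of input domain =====

-- B replaces A's index loop with carried run state by: build the chunk list once, then
-- recursively split off one run at a time (objective: alternative decomposition, same cost).

-- ===== PORT A =====
-- transliteration of A's for-loop (the early return is the first branch)
def cuttingLoop (s : List Char) (length : Int) (idxs : List Int)
    (start_target : List Char) (press : Int) (answer : List Char) : Int :=
  match idxs with
  | [] =>
    if press == 1 then ((answer ++ start_target).length : Int)
    else ((answer ++ (PySem.Int.toStr press).toList ++ start_target).length : Int)
  | i :: rest =>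
    if (s.length : Int) < i + length then
      (if press == 1 then
        ((answer ++ start_target ++ PySem.List.slice s (some i) none).length : Int)
      else
        ((answer ++ (PySem.Int.toStr press).toList ++ start_target ++ PySem.List.slice s (some i) none).length : Int))
    else if PySem.List.slice s (some i) (some (i + length)) = start_target then
      cuttingLoop s length rest start_target (press + 1) answer
    else
      cuttingLoop s length rest (PySem.List.slice s (some i) (some (i + length))) 1
        (if press == 1 then answer ++ start_target
         else answer ++ (PySem.Int.toStr press).toList ++ start_target)

def cutting (s : String) (length : Int) : Int :=
  cuttingLoop s.toList length (PySem.List.pyRange length (s.toList.length : Int) length)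
    (PySem.List.slice s.toList (some 0) (some length)) 1 []

-- ===== PORT B =====
-- the while-loop of Source B counts: 1 + (leading elements of rest[1:] equal to head)
def bLead (head : List Char) : List (List Char) → Nat
  | [] => 0
  | c :: cs => if c = head then bLead head cs + 1 else 0

-- go(rest) of Source B
def bGo : List (List Char) → Int
  | [] => 0
  | head :: tl =>
    (head.length : Int) +
      (if (1 : Int) < 1 + (bLead head tl : Int)
        then ((PySem.Int.toStr (1 + (bLead head tl : Int))).toList.length : Int) else 0) +
      bGo (tl.drop (bLead head tl))
termination_by l => l.length
decreasing_by simp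

def cutting_alt (s : String) (length : Int) : Int :=
  bGo ((PySem.List.pyRange 0 (s.toList.length : Int) length).map
    (fun i => PySem.List.slice s.toList (some i) (some (i + length))))

-- ===== PRECONDITION & SPEC =====
-- Pre_ restricts to the task's natural domain length ≥ 1: at length = 0 both A and B raise
-- ValueError in range(); a negative chunk size is outside the natural domain and A's value
-- there (the length of a negative slice of s) is accidental, B naturally returns 0.
def Pre_cutting (s : String) (length : Int) : Prop := 1 ≤ length
instance (s : String) (length : Int) : Decidable (Pre_cutting s length) := by
  unfold Pre_cutting; infer_instance

def pvWitness_cutting : String × Int := ("aabbaccc", 2)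

def Spec_cutting (s : String) (length : Int) (out : Int) : Prop := out = cutting_alt s length
instance (s : String) (length : Int) (out : Int) : Decidable (Spec_cutting s length out) := by
  unfold Spec_cutting; infer_instance

-- ===== CLAIM (what is proved, stated in full; the proofs are below) =====
def Claim_equal_cutting : Prop := ∀ (s : String) (length : Int),
  Dom_cutting s length → Pre_cutting s length → Spec_cutting s length (cutting s length)

-- ===== LEMMAS AND PROOFS =====

-- run-length reference: current run chunk `st`, its count so far `p`, remaining chunks
def pvContrib (st : List Char) (p : Int) : Int :=
  (st.length : Int) + (if 1 < p then ((PySem.Int.toStr p).toList.length : Int) else 0)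

def pvRun : List Char → Int → List (List Char) → Int
  | st, p, [] => pvContrib st p
  | st, p, c :: rest =>
    if c = st then pvRun st (p + 1) rest
    else pvContrib st p + pvRun c 1 rest

lemma pyRange_pos_nil (a b s : Int) (hs : 0 < s) (h : b ≤ a) :
    PySem.List.pyRange a b s = [] := by
  rw [PySem.List.pyRange_of_pos a b hs]
  simp [show ¬ a < b by omega]

lemma pyRange_pos_cons (a b s : Int) (hs : 0 < s) (h : a < b) :
    PySem.List.pyRange a b s = a :: PySem.List.pyRange (a + s) b s := by
  rw [PySem.List.pyRange_of_pos a b hs, PySem.List.pyRange_of_pos (a + s) b hs]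
  have hdiv : (b - a + s - 1) / s = (b - (a + s) + s - 1) / s + 1 := by
    have hrw : b - a + s - 1 = (b - (a + s) + s - 1) + 1 * s := by ring
    rw [hrw, Int.add_mul_ediv_right _ _ (by omega : s ≠ 0)]
  by_cases hlt : a + s < b
  · have h1 : 0 ≤ (b - (a + s) + s - 1) / s := by
      apply Int.ediv_nonneg <;> omega
    have h2 : ((b - (a + s) + s - 1) / s + 1).toNat = ((b - (a + s) + s - 1) / s).toNat + 1 := by
      omega
    rw [if_pos h, if_pos hlt, hdiv, h2, List.range_succ_eq_map]
    simp only [List.map_cons, List.map_map, Nat.cast_zero, mul_zero, add_zero, List.cons.injEq]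
    refine ⟨trivial, List.map_congr_left ?_⟩
    intro k _
    simp only [Function.comp_apply]
    push_cast
    ring
  · have hd0 : (b - (a + s) + s - 1) / s = 0 :=
      Int.ediv_eq_zero_of_lt (by omega) (by omega)
    rw [if_pos h, if_neg hlt, hdiv, hd0]
    norm_num

lemma len_slice_from (cs : List Char) (i : Int) (h : 0 ≤ i) :
    (PySem.List.slice cs (some i) none).length = cs.length - i.toNat := by
  rw [PySem.List.slice_from cs h]; simp

lemma len_chunk (cs : List Char) (i L : Int) (h0 : 0 ≤ i) (hL : 0 ≤ L) :
    (PySem.List.slice cs (some i) (some (i + L))).length = min L.toNat (cs.length - i.toNat) := by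
  rw [PySem.List.slice_toNat cs h0 (by omega)]
  simp only [List.length_take, List.length_drop]
  congr 1
  omega

lemma flush_eq (st ans : List Char) (press : Int) (hp : 1 ≤ press) :
    (if press == 1 then ((ans ++ st).length : Int)
     else ((ans ++ (PySem.Int.toStr press).toList ++ st).length : Int))
    = (ans.length : Int) + pvContrib st press := by
  by_cases h : press = 1
  · subst h; simp [pvContrib]
  · rw [if_neg (by simpa using h)]
    unfold pvContrib
    rw [if_pos (by omega)]
    push_cast [List.length_append]
    ring

-- L2: pvRun absorbs the leading run of its chunk list
lemma pvRun_eq_bGo (rest : List (List Char)) : ∀ (st : List Char) (p : Int), 1 ≤ p →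
    pvRun st p rest = pvContrib st (p + (bLead st rest : Int)) + bGo (rest.drop (bLead st rest)) := by
  induction rest with
  | nil =>
    intro st p hp
    simp [pvRun, bLead, bGo]
  | cons c cs ih =>
    intro st p hp
    by_cases hc : c = st
    · subst hc
      rw [show pvRun c p (c :: cs) = pvRun c (p + 1) cs from by simp [pvRun],
          ih c (p + 1) (by omega)]
      have hb : bLead c (c :: cs) = bLead c cs + 1 := by simp [bLead]
      rw [hb, List.drop_succ_cons]
      congr 2
      push_cast
      ring
    · rw [show pvRun st p (c :: cs) = pvContrib st p + pvRun c 1 cs from by simp [pvRun, hc]]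
      have hb : bLead st (c :: cs) = 0 := by simp [bLead, hc]
      rw [hb, List.drop_zero]
      push_cast
      rw [add_zero]
      congr 1
      rw [ih c 1 (by omega)]
      rw [show bGo (c :: cs) = (c.length : Int) +
            (if (1 : Int) < 1 + (bLead c cs : Int)
              then ((PySem.Int.toStr (1 + (bLead c cs : Int))).toList.length : Int) else 0) +
            bGo (cs.drop (bLead c cs)) from by simp only [bGo]]
      unfold pvContrib
      ring_nf

lemma bGo_cons (c : List Char) (cs : List (List Char)) :
    bGo (c :: cs) = pvRun c 1 cs := by
  rw [pvRun_eq_bGo cs c 1 (by omega)]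
  rw [show bGo (c :: cs) = (c.length : Int) +
        (if (1 : Int) < 1 + (bLead c cs : Int)
          then ((PySem.Int.toStr (1 + (bLead c cs : Int))).toList.length : Int) else 0) +
        bGo (cs.drop (bLead c cs)) from by simp only [bGo]]
  unfold pvContrib
  ring_nf

-- main loop lemma for A's loop: it computes the run-length total of the remaining chunks
lemma loopA (cs : List Char) (L : Int) (hL : 1 ≤ L) :
    ∀ (m : Nat) (i press : Int) (st ans : List Char),
      0 ≤ i → 1 ≤ press → ((cs.length : Int) - i).toNat ≤ m →
      (PySem.List.pyRange i (cs.length : Int) L ≠ [] → (st.length : Int) = L) →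
      cuttingLoop cs L (PySem.List.pyRange i (cs.length : Int) L) st press ans
        = (ans.length : Int) +
          pvRun st press ((PySem.List.pyRange i (cs.length : Int) L).map
            (fun j => PySem.List.slice cs (some j) (some (j + L)))) := by
  intro m
  induction m with
  | zero =>
    intro i press st ans h0 hp hm _
    rw [pyRange_pos_nil _ _ _ (by omega) (by omega)]
    simp only [cuttingLoop, List.map_nil, pvRun]
    exact flush_eq st ans press hp
  | succ m ih =>
    intro i press st ans h0 hp hm hst
    by_cases hin : (cs.length : Int) ≤ i
    · rw [pyRange_pos_nil _ _ _ (by omega) hin]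
      simp only [cuttingLoop, List.map_nil, pvRun]
      exact flush_eq st ans press hp
    · have hcons := pyRange_pos_cons i (cs.length : Int) L (by omega) (by omega)
      have hstL : (st.length : Int) = L := hst (by rw [hcons]; simp)
      rw [hcons]
      simp only [cuttingLoop, List.map_cons, pvRun]
      by_cases hpart : (cs.length : Int) < i + L
      · rw [if_pos hpart]
        have hrest : PySem.List.pyRange (i + L) (cs.length : Int) L = [] :=
          pyRange_pos_nil _ _ _ (by omega) (by omega)
        have hclen := len_chunk cs i L h0 (by omega)
        have hclen' : ((PySem.List.slice cs (some i) (some (i + L))).length : Int)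
            = (cs.length : Int) - i := by rw [hclen]; omega
        have hne : ¬ (PySem.List.slice cs (some i) (some (i + L)) = st) := by
          intro h
          have := congrArg List.length h
          omega
        rw [hrest]
        simp only [List.map_nil, pvRun, if_neg hne]
        have hsf : ((PySem.List.slice cs (some i) none).length : Int)
            = (cs.length : Int) - i := by rw [len_slice_from cs i h0]; omega
        by_cases h1 : press = 1
        · subst h1
          rw [if_pos (by simp)]
          simp only [pvContrib, if_neg (by omega : ¬ (1:Int) < 1)]
          push_cast [List.length_append]
          omega
        · rw [if_neg (by simpa using h1)]
          simp only [pvContrib, if_pos (by omega : (1:Int) < press), if_neg (by omega : ¬ (1:Int) < 1)]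
          push_cast [List.length_append]
          omega
      · rw [if_neg hpart]
        have hfull : ((PySem.List.slice cs (some i) (some (i + L))).length : Int) = L := by
          rw [len_chunk cs i L h0 (by omega)]; omega
        by_cases heq : PySem.List.slice cs (some i) (some (i + L)) = st
        · rw [if_pos heq, if_pos heq]
          exact ih (i + L) (press + 1) st ans (by omega) (by omega) (by omega)
            (fun _ => hstL)
        · rw [if_neg heq, if_neg heq]
          rw [ih (i + L) 1 (PySem.List.slice cs (some i) (some (i + L)))
                (if press == 1 then ans ++ st
                 else ans ++ (PySem.Int.toStr press).toList ++ st)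
                (by omega) (by omega) (by omega) (fun _ => hfull)]
          have hfl : ((if press == 1 then ans ++ st
              else ans ++ (PySem.Int.toStr press).toList ++ st).length : Int)
              = (ans.length : Int) + pvContrib st press := by
            by_cases h1 : press = 1
            · subst h1; simp [pvContrib]
            · rw [if_neg (by simpa using h1)]
              unfold pvContrib
              rw [if_pos (by omega)]
              push_cast [List.length_append]
              ring
          rw [hfl]
          ring

-- ===== VERDICT (by name: the statement is the Claim_ definition above) =====
theorem cutting_spec : Claim_equal_cutting := by
  unfold Claim_equal_cutting
  intro s L _ hpre
  unfold Pre_cutting at hpre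
  unfold Spec_cutting cutting cutting_alt
  by_cases hn : s.toList.length = 0
  · have hcs : s.toList = [] := List.eq_nil_of_length_eq_zero hn
    rw [hcs]
    simp only [List.length_nil, Nat.cast_zero]
    rw [pyRange_pos_nil L 0 L (by omega) (by omega), pyRange_pos_nil 0 0 L (by omega) (by omega)]
    simp [cuttingLoop, bGo,
      PySem.List.slice_toNat ([] : List Char) (by omega : (0:Int) ≤ 0) (by omega : 0 ≤ L)]
  · have hzc := pyRange_pos_cons 0 (s.toList.length : Int) L (by omega) (by omega)
    rw [zero_add] at hzc
    rw [hzc]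
    simp only [List.map_cons, zero_add]
    rw [bGo_cons]
    have := loopA s.toList L hpre (s.toList.length) L 1 (PySem.List.slice s.toList (some 0) (some L)) []
      (by omega) (by omega) (by omega)
      (fun hne => by
        have hLn : L < (s.toList.length : Int) := by
          by_contra hc
          exact hne (pyRange_pos_nil _ _ _ (by omega) (by omega))
        have h := len_chunk s.toList 0 L (by omega) (by omega)
        rw [zero_add] at h
        rw [h]
        omega)
    rw [this]
    simp
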